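-- pv_equiv track=rewrite | github.com/ibeale/AdventofCode2020 | day4/day4.py | cleanRawData
-- ===== SOURCE A (Python) =====
-- def cleanRawData(rawData):
--     passportList = []
--     passport = {}
--     for line in rawData:
--         if not line.keys():
--             passportList.append(passport)
--             passport = {}
--         else:
--             passport.update(line)
--     return passportList
-- ===== SOURCE B (Python) =====
-- def cleanRawData(rawData):
--     # Two-pass decomposition: partition into segments at empty dicts
--     # (trailing segment before end-of-input is not closed, matching the
--     # separator-terminated grouping), then merge each segment.
--     segments = []
--     current = []
--     for line in rawData:
--         if not line.keys():
--             segments.append(current)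
--             current = []
--         else:
--             current.append(line)
--     result = []
--     for seg in segments:
--         merged = {}
--         for d in seg:
--             merged = {**merged, **d}
--         result.append(merged)
--     return result
-- ===== Notes on version B (the rewrite author's own statement) =====
-- stated objective: alternative
-- what changed: B separates the concerns into two passes: first partition the input into segments delimited by empty dicts (trailing unterminated segment dropped, as in A), then merge each segment into one dict via dict-unpacking; A interleaves grouping and merging in one loop with a mutable running dict.
import Mathlib
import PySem

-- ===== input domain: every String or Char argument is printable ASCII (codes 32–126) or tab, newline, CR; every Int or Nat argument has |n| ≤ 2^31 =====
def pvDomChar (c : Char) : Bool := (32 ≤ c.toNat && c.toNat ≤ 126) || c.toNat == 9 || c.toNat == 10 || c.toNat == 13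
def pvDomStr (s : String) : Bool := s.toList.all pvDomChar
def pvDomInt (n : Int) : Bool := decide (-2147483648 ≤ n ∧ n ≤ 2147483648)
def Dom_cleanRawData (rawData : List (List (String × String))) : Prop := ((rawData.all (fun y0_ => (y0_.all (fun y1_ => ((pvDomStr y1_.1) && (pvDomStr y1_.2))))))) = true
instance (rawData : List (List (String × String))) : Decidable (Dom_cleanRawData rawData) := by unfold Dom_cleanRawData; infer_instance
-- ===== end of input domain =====

-- B restates the grouping as partition-into-segments then merge-each-segment (two passes), instead of A's single loop with a mutable running dict; objective: alternative decomposition.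


-- ===== PORT A =====
-- single loop: on an empty line append the running passport, otherwise passport.update(line)
def cleanRawData (rawData : List (List (String × String))) : List (List (String × String)) :=
  (rawData.foldl
    (fun (st : List (List (String × String)) × PySem.Dict String String) line =>
      if line.isEmpty then (st.1 ++ [st.2.items], PySem.Dict.empty)
      else (st.1, PySem.Dict.update st.2 line))
    ([], PySem.Dict.empty)).1

-- ===== PORT B =====
-- pass 1: partition into segments closed by empty lines (trailing open segment dropped)
def pvSegments (rawData : List (List (String × String))) :
    List (List (List (String × String))) × List (List (String × String)) :=
  rawData.foldl
    (fun st line =>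
      if line.isEmpty then (st.1 ++ [st.2], [])
      else (st.1, st.2 ++ [line]))
    ([], [])

-- pass 2: merged = {**merged, **d} for each d in the segment
def pvMergeSeg (seg : List (List (String × String))) : List (String × String) :=
  (seg.foldl (fun acc d => d.foldl (fun m kv => PySem.Dict.insert m kv.1 kv.2) acc)
    (PySem.Dict.empty : PySem.Dict String String)).items

def cleanRawData_alt (rawData : List (List (String × String))) : List (List (String × String)) :=
  ((pvSegments rawData).1).map pvMergeSeg

-- ===== PRECONDITION & SPEC =====
def Spec_cleanRawData (rawData : List (List (String × String))) (out : List (List (String × String))) : Prop := out = cleanRawData_alt rawData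
instance (rawData : List (List (String × String))) (out : List (List (String × String))) : Decidable (Spec_cleanRawData rawData out) := by unfold Spec_cleanRawData; infer_instance

-- ===== CLAIM (what is proved, stated in full; the proofs are below) =====
def Claim_equal_cleanRawData : Prop := ∀ (rawData : List (List (String × String))), Dom_cleanRawData rawData → Spec_cleanRawData rawData (cleanRawData rawData)

-- ===== LEMMAS AND PROOFS =====

-- B's merge of the open segment, as a Dict (proof-only view of pvMergeSeg before .items)
def pvMergeDict (seg : List (List (String × String))) : PySem.Dict String String :=
  seg.foldl (fun acc d => d.foldl (fun m kv => PySem.Dict.insert m kv.1 kv.2) acc)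
    PySem.Dict.empty

-- {**m, **d} (insert d's items one by one) is exactly dict.update
theorem pvUpdate_eq_foldl_insert (m : PySem.Dict String String) (d : List (String × String)) :
    PySem.Dict.update m d = d.foldl (fun m kv => PySem.Dict.insert m kv.1 kv.2) m := by
  induction d generalizing m with
  | nil => rfl
  | cons kv rest ih => simp [PySem.Dict.update, List.foldl]

theorem pvMergeDict_append (seg : List (List (String × String))) (line : List (String × String)) :
    pvMergeDict (seg ++ [line]) = PySem.Dict.update (pvMergeDict seg) line := by
  simp [pvMergeDict, List.foldl_append, pvUpdate_eq_foldl_insert]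

-- loop invariant: A's state = (items of merges of B's closed segments, merge of B's open segment)
theorem pvInvariant (rawData : List (List (String × String)))
    (segs : List (List (List (String × String)))) (cur : List (List (String × String))) :
    rawData.foldl
      (fun (st : List (List (String × String)) × PySem.Dict String String) line =>
        if line.isEmpty then (st.1 ++ [st.2.items], PySem.Dict.empty)
        else (st.1, PySem.Dict.update st.2 line))
      (segs.map pvMergeSeg, pvMergeDict cur)
    = (let p := rawData.foldl
        (fun st line =>
          if line.isEmpty then (st.1 ++ [st.2], [])
          else (st.1, st.2 ++ [line]))
        (segs, cur)
       (p.1.map pvMergeSeg, pvMergeDict p.2)) := by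
  induction rawData generalizing segs cur with
  | nil => rfl
  | cons line rest ih =>
    by_cases h : line.isEmpty
    · simpa [List.foldl, h, pvMergeSeg, pvMergeDict] using ih (segs ++ [cur]) []
    · simpa [List.foldl, h, pvMergeDict_append] using ih segs (cur ++ [line])

-- ===== VERDICT (by name: the statement is the Claim_ definition above) =====
theorem cleanRawData_spec : Claim_equal_cleanRawData := by
  intro rawData _
  unfold Spec_cleanRawData cleanRawData cleanRawData_alt pvSegments
  have h := pvInvariant rawData [] []
  simpa [pvMergeDict] using congrArg Prod.fst h
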